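-- pv_equiv track=rewrite | github.com/jjongs2/leetcode | 2429-minimize-xor/2429-minimize-xor.py | minimizeXor
-- ===== SOURCE A (Python) =====
-- def minimizeXor(num1: int, num2: int) -> int:
--     n = num1.bit_count() - num2.bit_count()
--     x = num1
--     mask = 1
--     while n < 0:
--         while x & mask == mask:
--             mask <<= 1
--         x |= mask
--         n += 1
--     mask = 1
--     while n > 0:
--         while x & mask == 0:
--             mask <<= 1
--         x ^= mask
--         n -= 1
--     return x
-- ===== SOURCE B (Python) =====
-- def minimizeXor(num1: int, num2: int) -> int:
--     k = num2.bit_count()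
--     result = 0
--     # keep num1's highest k set bits, building a fresh result from 0
--     for pos in range(num1.bit_length() - 1, -1, -1):
--         if k and (num1 >> pos) & 1:
--             result |= 1 << pos
--             k -= 1
--     # still short of k set bits: set the lowest zero bits, bottom up
--     pos = 0
--     while k:
--         if not (result >> pos) & 1:
--             result |= 1 << pos
--             k -= 1
--         pos += 1
--     return result
-- ===== Notes on version B (the rewrite author's own statement) =====
-- stated objective: alternative
-- what changed: Instead of mutating num1 in place via nested while loops that scan a shifting mask for the lowest zero/one bit, B builds a fresh result from 0 in two staged passes: a downward pass over bit positions keeps num1's highest k = num2.bit_count() set bits, then an upward pass sets the lowest zero bits until k set bits are placed.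
-- outside the precondition, e.g. on minimizeXor(-3, 1): A returns -4, B returns 1
import Mathlib
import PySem

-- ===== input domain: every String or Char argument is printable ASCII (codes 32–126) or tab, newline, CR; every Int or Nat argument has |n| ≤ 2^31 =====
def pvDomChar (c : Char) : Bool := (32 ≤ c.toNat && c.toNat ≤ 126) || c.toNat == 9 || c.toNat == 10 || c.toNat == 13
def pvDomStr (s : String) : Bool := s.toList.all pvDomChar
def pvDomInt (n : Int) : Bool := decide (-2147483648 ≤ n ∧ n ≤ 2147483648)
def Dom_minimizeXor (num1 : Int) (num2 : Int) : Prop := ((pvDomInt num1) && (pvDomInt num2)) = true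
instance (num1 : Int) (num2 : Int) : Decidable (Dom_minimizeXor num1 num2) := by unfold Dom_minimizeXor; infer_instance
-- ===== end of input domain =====

-- B builds a fresh result from 0 in two staged passes (keep num1's highest k set bits
-- top-down, then fill the lowest zero bits bottom-up) instead of A's in-place mutation
-- of num1 via nested mask-scanning while loops (objective: alternative decomposition).

-- ===== PORT A =====
-- Python's int.bit_count() = population count of |n|; a builtin both Pythons call.
def popcount (n : Nat) : Nat :=
  if n = 0 then 0 else popcount (n / 2) + n % 2
decreasing_by exact Nat.div_lt_self (Nat.pos_of_ne_zero (by assumption)) one_lt_two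

-- inner `while x & mask == mask: mask <<= 1`; the `mask ≠ 0` guard only makes it total
-- (mask is always a power of two when called).
def skipOnes (x mask : Nat) : Nat :=
  if h : mask ≠ 0 ∧ x &&& mask = mask then skipOnes x (mask <<< 1) else mask
termination_by x + 1 - mask
decreasing_by
  have h1 : mask ≤ x := h.2 ▸ Nat.and_le_left
  have h0 : mask ≠ 0 := h.1
  simp only [Nat.shiftLeft_eq, pow_one]
  omega

-- inner `while x & mask == 0: mask <<= 1`; the `mask ≠ 0 ∧ mask ≤ x` guard only makes it
-- total (the loop is only entered when x still has a set bit at or above mask).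
def skipZeros (x mask : Nat) : Nat :=
  if h : mask ≠ 0 ∧ mask ≤ x ∧ x &&& mask = 0 then skipZeros x (mask <<< 1) else mask
termination_by x + 1 - mask
decreasing_by
  simp only [Nat.shiftLeft_eq, pow_one]
  omega

-- outer `while n < 0` loop; returns the final (x, n). Under Pre_ x is nonnegative and is
-- carried as its magnitude (a Nat).
def growA (x mask : Nat) (n : Int) : Nat × Int :=
  if n < 0 then
    let m := skipOnes x mask
    growA (x ||| m) m (n + 1)
  else (x, n)
termination_by (-n).toNat
decreasing_by omega

-- outer `while n > 0` loop.
def trimA (x mask : Nat) (n : Int) : Nat :=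
  if n > 0 then
    let m := skipZeros x mask
    trimA (x ^^^ m) m (n - 1)
  else x
termination_by n.toNat
decreasing_by omega

-- `x = num1` is carried as `num1.toNat`: exact on Pre_ (0 ≤ num1), the only inputs claimed.
def minimizeXor (num1 : Int) (num2 : Int) : Int :=
  let n : Int := (popcount num1.natAbs : Int) - (popcount num2.natAbs : Int)
  let r := growA num1.toNat 1 n
  ((trimA r.1 1 r.2 : Nat) : Int)

-- ===== PORT B =====
-- Python's int.bit_length(); a builtin B calls.
def bitLength (n : Nat) : Nat :=
  if n = 0 then 0 else bitLength (n / 2) + 1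
decreasing_by exact Nat.div_lt_self (Nat.pos_of_ne_zero (by assumption)) one_lt_two

theorem lt_two_pow_bitLength (n : Nat) : n < 2 ^ bitLength n := by
  induction n using Nat.strong_induction_on with
  | _ n ih =>
    rw [bitLength]
    rcases eq_or_ne n 0 with rfl | h
    · simp
    · rw [if_neg h]
      have := ih (n / 2) (Nat.div_lt_self (Nat.pos_of_ne_zero h) one_lt_two)
      rw [pow_succ]
      omega

-- termination fact for `fillLow` below (cited by name in its decreasing_by)
theorem pos_lt_bitLength (res pos : Nat) (h : (res >>> pos) &&& 1 ≠ 0) :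
    pos < bitLength res := by
  rw [Nat.shiftRight_eq_div_pow, Nat.and_one_is_mod] at h
  have h1 : 2 ^ pos ≤ res := by
    have hd := Nat.div_add_mod res (2 ^ pos)
    have hp := Nat.two_pow_pos pos
    by_contra hc
    push_neg at hc
    have : res / 2 ^ pos = 0 := Nat.div_eq_of_lt hc
    omega
  have h2 := lt_two_pow_bitLength res
  by_contra hc
  push_neg at hc
  have := Nat.pow_le_pow_right (by norm_num : 1 ≤ 2) hc
  omega

-- `for pos in range(num1.bit_length()-1, -1, -1): if k and (num1 >> pos) & 1: …`
-- descending pass over the bit positions, picking the highest k set bits into res.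
def pickHigh (a k res p : Nat) : Nat × Nat :=
  match p with
  | 0 => (res, k)
  | p + 1 =>
    if k ≠ 0 ∧ (a >>> p) &&& 1 ≠ 0 then pickHigh a (k - 1) (res ||| (1 <<< p)) p
    else pickHigh a k res p

-- `while k: if not (result >> pos) & 1: … ; pos += 1` — ascending fill of zero bits.
def fillLow (res k pos : Nat) : Nat :=
  if k ≠ 0 then
    if (res >>> pos) &&& 1 = 0 then fillLow (res ||| (1 <<< pos)) (k - 1) (pos + 1)
    else fillLow res k (pos + 1)
  else res
termination_by (k, bitLength res + 1 - pos)
decreasing_by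
  · exact Prod.Lex.left _ _ (by omega)
  · exact Prod.Lex.right _ (by
      have := pos_lt_bitLength res pos (by assumption)
      omega)

def minimizeXor_alt (num1 : Int) (num2 : Int) : Int :=
  let k := popcount num2.natAbs
  let r := pickHigh num1.natAbs k 0 (bitLength num1.natAbs)
  ((fillLow r.1 r.2 0 : Nat) : Int)

-- ===== PRECONDITION & SPEC =====
-- Pre_ excludes negative num1: there Python's unbounded two's-complement makes A diverge
-- whenever it needs more zero bits than num1's pattern offers (e.g. num1 = -1, num2 = 3),
-- and on the negative inputs where A does return, A's two's-complement result is an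
-- artefact B's nonnegative construction does not reproduce (e.g. A returns -4 on (-3, 1),
-- B returns 1); the ports carry the number as an unsigned magnitude.
def Pre_minimizeXor (num1 : Int) (num2 : Int) : Prop := 0 ≤ num1
instance (num1 : Int) (num2 : Int) : Decidable (Pre_minimizeXor num1 num2) := by
  unfold Pre_minimizeXor; infer_instance

def pvWitness_minimizeXor : Int × Int := (3, 5)

def Spec_minimizeXor (num1 : Int) (num2 : Int) (out : Int) : Prop := out = minimizeXor_alt num1 num2
instance (num1 : Int) (num2 : Int) (out : Int) : Decidable (Spec_minimizeXor num1 num2 out) := by unfold Spec_minimizeXor; infer_instance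

-- ===== CLAIM (what is proved, stated in full; the proofs are below) =====
def Claim_equal_minimizeXor : Prop := ∀ (num1 : Int) (num2 : Int), Dom_minimizeXor num1 num2 → Pre_minimizeXor num1 num2 → Spec_minimizeXor num1 num2 (minimizeXor num1 num2)

-- ===== LEMMAS AND PROOFS =====

-- proof-side normal form both ports are reduced to: clear the lowest c set bits, then
-- set the lowest c' zero bits
def clearBits (x : Nat) : Nat → Nat
  | 0 => x
  | c + 1 => clearBits (x &&& (x - 1)) c

def setBits (x : Nat) : Nat → Nat
  | 0 => x
  | c + 1 => setBits (x ||| (x + 1)) c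

theorem popcount_zero : popcount 0 = 0 := by simp [popcount]

theorem popcount_step (c : Nat) : popcount c = popcount (c / 2) + c % 2 := by
  rw [popcount]
  rcases eq_or_ne c 0 with rfl | h
  · simp [popcount_zero]
  · simp [h]

theorem popcount_one : popcount 1 = 1 := by
  rw [popcount_step]
  simp [popcount_zero]

theorem popcount_mul_pow_add (k : Nat) : ∀ a c : Nat, c < 2 ^ k →
    popcount (2 ^ k * a + c) = popcount a + popcount c := by
  induction k with
  | zero =>
    intro a c hc
    have : c = 0 := by omega
    subst this
    simp [popcount_zero]
  | succ k ih =>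
    intro a c hc
    have hm : 2 ^ (k + 1) * a = 2 * (2 ^ k * a) := by ring
    have hk : (2 : Nat) ^ (k + 1) = 2 * 2 ^ k := by ring
    rw [popcount_step (2 ^ (k + 1) * a + c), hm]
    have h2 : (2 * (2 ^ k * a) + c) / 2 = 2 ^ k * a + c / 2 := by omega
    have h3 : (2 * (2 ^ k * a) + c) % 2 = c % 2 := by omega
    rw [h2, h3, ih a (c / 2) (by omega)]
    rw [popcount_step c]
    omega

theorem popcount_two_pow (p : Nat) : popcount (2 ^ p) = 1 := by
  have h := popcount_mul_pow_add p 1 0 (by positivity)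
  simpa [popcount_zero, popcount_one] using h

theorem and_pow (x j : Nat) : x &&& 2 ^ j = (x / 2 ^ j % 2) * 2 ^ j := by
  rw [Nat.and_two_pow, Nat.testBit_eq_decide_div_mod_eq]
  rcases Nat.mod_two_eq_zero_or_one (x / 2 ^ j) with h | h <;> simp [h]

theorem or_chunk (k a a' b c : Nat) (hb : b < 2 ^ k) (hc : c < 2 ^ k) :
    (2 ^ k * a + b) ||| (2 ^ k * a' + c) = 2 ^ k * (a ||| a') + (b ||| c) := by
  apply Nat.eq_of_testBit_eq
  intro i
  rw [Nat.testBit_lor, Nat.testBit_two_pow_mul_add a hb i, Nat.testBit_two_pow_mul_add a' hc i,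
      Nat.testBit_two_pow_mul_add (a ||| a') (Nat.or_lt_two_pow hb hc) i]
  split_ifs <;> simp

theorem and_chunk (k a a' b c : Nat) (hb : b < 2 ^ k) (hc : c < 2 ^ k) :
    (2 ^ k * a + b) &&& (2 ^ k * a' + c) = 2 ^ k * (a &&& a') + (b &&& c) := by
  apply Nat.eq_of_testBit_eq
  intro i
  rw [Nat.testBit_and, Nat.testBit_two_pow_mul_add a hb i, Nat.testBit_two_pow_mul_add a' hc i,
      Nat.testBit_two_pow_mul_add (a &&& a') (Nat.and_lt_two_pow b hc) i]
  split_ifs <;> simp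

theorem xor_chunk (k a a' b c : Nat) (hb : b < 2 ^ k) (hc : c < 2 ^ k) :
    (2 ^ k * a + b) ^^^ (2 ^ k * a' + c) = 2 ^ k * (a ^^^ a') + (b ^^^ c) := by
  apply Nat.eq_of_testBit_eq
  intro i
  rw [Nat.testBit_xor, Nat.testBit_two_pow_mul_add a hb i, Nat.testBit_two_pow_mul_add a' hc i,
      Nat.testBit_two_pow_mul_add (a ^^^ a') (Nat.xor_lt_two_pow hb hc) i]
  split_ifs <;> simp

theorem pow_pos' (p : Nat) : 0 < 2 ^ p := by positivity

theorem pow_and_pred (p : Nat) : 2 ^ p &&& (2 ^ p - 1) = 0 := by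
  have h := and_chunk p 1 0 0 (2 ^ p - 1) (pow_pos' p) (by have := pow_pos' p; omega)
  simpa using h

theorem pred_lor_pow (p : Nat) : (2 ^ p - 1) ||| 2 ^ p = 2 ^ (p + 1) - 1 := by
  have h := or_chunk p 0 1 (2 ^ p - 1) 0 (by have := pow_pos' p; omega) (pow_pos' p)
  have hk : (2 : Nat) ^ (p + 1) = 2 * 2 ^ p := by ring
  simp at h
  omega

-- decomposition of x from its residue mod 2^(p+1)
theorem decomp (x p r : Nat) (h : x % 2 ^ (p + 1) = r) :
    x = 2 ^ (p + 1) * (x / 2 ^ (p + 1)) + r := by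
  have := Nat.div_add_mod x (2 ^ (p + 1))
  omega

theorem xor_pow_of_bit (x p : Nat) (h : x % 2 ^ (p + 1) = 2 ^ p) : x ^^^ 2 ^ p = x - 2 ^ p := by
  obtain ⟨q, hq⟩ : ∃ q, x = 2 ^ (p + 1) * q + 2 ^ p := ⟨_, decomp x p (2 ^ p) h⟩
  have hp := pow_pos' p
  have hk : (2 : Nat) ^ (p + 1) = 2 * 2 ^ p := by ring
  have h2 : x ^^^ 2 ^ p = (2 ^ (p + 1) * q + 2 ^ p) ^^^ (2 ^ (p + 1) * 0 + 2 ^ p) := by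
    rw [← hq]; norm_num
  rw [h2, xor_chunk (p + 1) _ 0 _ _ (by omega) (by omega)]
  simp
  omega

theorem and_pred_of_bit (x p : Nat) (h : x % 2 ^ (p + 1) = 2 ^ p) : x &&& (x - 1) = x - 2 ^ p := by
  obtain ⟨q, hq⟩ : ∃ q, x = 2 ^ (p + 1) * q + 2 ^ p := ⟨_, decomp x p (2 ^ p) h⟩
  have hp := pow_pos' p
  have hk : (2 : Nat) ^ (p + 1) = 2 * 2 ^ p := by ring
  have h1 : x - 1 = 2 ^ (p + 1) * q + (2 ^ p - 1) := by omega
  have h2 : x &&& (x - 1) = (2 ^ (p + 1) * q + 2 ^ p) &&& (2 ^ (p + 1) * q + (2 ^ p - 1)) := by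
    rw [← hq, ← h1]
  rw [h2, and_chunk (p + 1) _ _ _ _ (by omega) (by omega)]
  rw [Nat.and_self, pow_and_pred]
  omega

theorem or_pow_of_ones (x p : Nat) (h : x % 2 ^ (p + 1) = 2 ^ p - 1) : x ||| 2 ^ p = x + 2 ^ p := by
  obtain ⟨q, hq⟩ : ∃ q, x = 2 ^ (p + 1) * q + (2 ^ p - 1) := ⟨_, decomp x p (2 ^ p - 1) h⟩
  have hp := pow_pos' p
  have hk : (2 : Nat) ^ (p + 1) = 2 * 2 ^ p := by ring
  have h2 : x ||| 2 ^ p = (2 ^ (p + 1) * q + (2 ^ p - 1)) ||| (2 ^ (p + 1) * 0 + 2 ^ p) := by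
    rw [← hq]; norm_num
  rw [h2, or_chunk (p + 1) _ 0 _ _ (by omega) (by omega)]
  simp [pred_lor_pow]
  omega

theorem or_succ_of_ones (x p : Nat) (h : x % 2 ^ (p + 1) = 2 ^ p - 1) : x ||| (x + 1) = x + 2 ^ p := by
  obtain ⟨q, hq⟩ : ∃ q, x = 2 ^ (p + 1) * q + (2 ^ p - 1) := ⟨_, decomp x p (2 ^ p - 1) h⟩
  have hp := pow_pos' p
  have hk : (2 : Nat) ^ (p + 1) = 2 * 2 ^ p := by ring
  have h1 : x + 1 = 2 ^ (p + 1) * q + 2 ^ p := by omega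
  have h2 : x ||| (x + 1) = (2 ^ (p + 1) * q + (2 ^ p - 1)) ||| (2 ^ (p + 1) * q + 2 ^ p) := by
    rw [← hq, ← h1]
  rw [h2, or_chunk (p + 1) _ _ _ _ (by omega) (by omega)]
  simp [pred_lor_pow]
  omega

theorem popcount_sub_pow (x p : Nat) (h : x % 2 ^ (p + 1) = 2 ^ p) :
    popcount (x - 2 ^ p) + 1 = popcount x := by
  obtain ⟨q, hq⟩ : ∃ q, x = 2 ^ (p + 1) * q + 2 ^ p := ⟨_, decomp x p (2 ^ p) h⟩
  have hp := pow_pos' p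
  have hk : (2 : Nat) ^ (p + 1) = 2 * 2 ^ p := by ring
  have h1 : popcount x = popcount q + 1 := by
    rw [hq, popcount_mul_pow_add (p + 1) _ _ (by omega), popcount_two_pow]
  have h2 : popcount (x - 2 ^ p) = popcount q := by
    have hx : x - 2 ^ p = 2 ^ (p + 1) * q + 0 := by omega
    rw [hx, popcount_mul_pow_add (p + 1) _ _ (by omega), popcount_zero]
    omega
  omega

theorem skipOnes_char (x : Nat) : ∀ mask : Nat, (∃ j, mask = 2 ^ j ∧ x % mask = mask - 1) →
    ∃ p, skipOnes x mask = 2 ^ p ∧ x % 2 ^ (p + 1) = 2 ^ p - 1 := by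
  refine skipOnes.induct x (fun mask => (∃ j, mask = 2 ^ j ∧ x % mask = mask - 1) →
    ∃ p, skipOnes x mask = 2 ^ p ∧ x % 2 ^ (p + 1) = 2 ^ p - 1) ?_ ?_
  · intro mask h ih
    rintro ⟨j, rfl, hmod⟩
    have hp := pow_pos' j
    have hb : x / 2 ^ j % 2 = 1 := by
      have h1 := and_pow x j
      rw [h.2] at h1
      rcases Nat.mod_two_eq_zero_or_one (x / 2 ^ j) with h2 | h2 <;> rw [h2] at h1 <;> omega
    rw [skipOnes, dif_pos h]
    apply ih
    refine ⟨j + 1, by rw [Nat.shiftLeft_eq, pow_one]; ring, ?_⟩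
    have hmm : x % (2 ^ j * 2) = x % 2 ^ j + 2 ^ j * (x / 2 ^ j % 2) := Nat.mod_mul
    rw [hb, Nat.mul_one] at hmm
    rw [Nat.shiftLeft_eq, pow_one]
    omega
  · intro mask h
    rintro ⟨j, rfl, hmod⟩
    have hp := pow_pos' j
    have hb : x / 2 ^ j % 2 = 0 := by
      rcases Nat.mod_two_eq_zero_or_one (x / 2 ^ j) with h2 | h2
      · exact h2
      · exfalso
        exact h ⟨by omega, by rw [and_pow, h2, one_mul]⟩
    rw [skipOnes, dif_neg h]
    refine ⟨j, rfl, ?_⟩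
    have hmm : x % (2 ^ j * 2) = x % 2 ^ j + 2 ^ j * (x / 2 ^ j % 2) := Nat.mod_mul
    rw [hb, Nat.mul_zero] at hmm
    rw [show (2 : Nat) ^ (j + 1) = 2 ^ j * 2 by ring]
    omega

theorem skipZeros_char (x : Nat) : ∀ mask : Nat, x ≠ 0 →
    (∃ j, mask = 2 ^ j ∧ x % mask = 0) →
    ∃ p, skipZeros x mask = 2 ^ p ∧ x % 2 ^ (p + 1) = 2 ^ p := by
  refine skipZeros.induct x (fun mask => x ≠ 0 → (∃ j, mask = 2 ^ j ∧ x % mask = 0) →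
    ∃ p, skipZeros x mask = 2 ^ p ∧ x % 2 ^ (p + 1) = 2 ^ p) ?_ ?_
  · intro mask h ih
    intro hx
    rintro ⟨j, rfl, hmod⟩
    have hp := pow_pos' j
    have hb : x / 2 ^ j % 2 = 0 := by
      have h1 := and_pow x j
      rw [h.2.2] at h1
      rcases Nat.mod_two_eq_zero_or_one (x / 2 ^ j) with h2 | h2 <;> rw [h2] at h1 <;> omega
    rw [skipZeros, dif_pos h]
    apply ih hx
    refine ⟨j + 1, by rw [Nat.shiftLeft_eq, pow_one]; ring, ?_⟩
    have hmm : x % (2 ^ j * 2) = x % 2 ^ j + 2 ^ j * (x / 2 ^ j % 2) := Nat.mod_mul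
    rw [hb, Nat.mul_zero] at hmm
    rw [Nat.shiftLeft_eq, pow_one]
    omega
  · intro mask h
    intro hx
    rintro ⟨j, rfl, hmod⟩
    have hp := pow_pos' j
    have hle : 2 ^ j ≤ x :=
      Nat.le_of_dvd (Nat.pos_of_ne_zero hx) (Nat.dvd_of_mod_eq_zero hmod)
    have hb : x / 2 ^ j % 2 = 1 := by
      rcases Nat.mod_two_eq_zero_or_one (x / 2 ^ j) with h2 | h2
      · exfalso
        exact h ⟨by omega, hle, by rw [and_pow, h2, zero_mul]⟩
      · exact h2
    rw [skipZeros, dif_neg h]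
    refine ⟨j, rfl, ?_⟩
    have hmm : x % (2 ^ j * 2) = x % 2 ^ j + 2 ^ j * (x / 2 ^ j % 2) := Nat.mod_mul
    rw [hb, Nat.mul_one] at hmm
    rw [show (2 : Nat) ^ (j + 1) = 2 ^ j * 2 by ring]
    omega

theorem growA_eq : ∀ (x mask : Nat) (n : Int), (∃ j, mask = 2 ^ j ∧ x % mask = mask - 1) →
    growA x mask n = (setBits x (-n).toNat, max n 0) := by
  intro x mask n
  induction x, mask, n using growA.induct with
  | case1 x mask n hn m ih =>
    intro hinv
    obtain ⟨p, hm, hmod⟩ := skipOnes_char x mask hinv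
    have hp := pow_pos' p
    have hk : (2 : Nat) ^ (p + 1) = 2 * 2 ^ p := by ring
    obtain ⟨q, hq⟩ : ∃ q, x = 2 ^ (p + 1) * q + (2 ^ p - 1) := ⟨_, decomp x p (2 ^ p - 1) hmod⟩
    have hstep : x ||| skipOnes x mask = x + 2 ^ p := by rw [hm]; exact or_pow_of_ones x p hmod
    have hstep' : x ||| (x + 1) = x + 2 ^ p := or_succ_of_ones x p hmod
    have hinv' : ∃ j, skipOnes x mask = 2 ^ j ∧
        (x ||| skipOnes x mask) % skipOnes x mask = skipOnes x mask - 1 := by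
      refine ⟨p, hm, ?_⟩
      rw [hstep, hm]
      have h1 : (x + 2 ^ p) % 2 ^ (p + 1) = 2 ^ (p + 1) - 1 := by
        have hx : x + 2 ^ p = 2 ^ (p + 1) * q + (2 ^ (p + 1) - 1) := by omega
        rw [hx, Nat.mul_add_mod]
        exact Nat.mod_eq_of_lt (by omega)
      have h2 : (x + 2 ^ p) % 2 ^ p = (x + 2 ^ p) % 2 ^ (p + 1) % 2 ^ p := by
        rw [Nat.mod_mod_of_dvd _ (pow_dvd_pow 2 (by omega))]
      rw [h2, h1, show (2 : Nat) ^ (p + 1) - 1 = (2 ^ p - 1) + 2 ^ p * 1 by omega,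
          Nat.add_mul_mod_self_left]
      exact Nat.mod_eq_of_lt (by omega)
    have hrec := ih hinv'
    rw [growA, if_pos hn]
    show growA (x ||| skipOnes x mask) (skipOnes x mask) (n + 1) = _
    rw [hrec, hstep]
    have hc : (-n).toNat = (-(n + 1)).toNat + 1 := by omega
    have hmax : max n 0 = max (n + 1) 0 := by
      rw [max_eq_right (by omega : n ≤ (0 : Int)), max_eq_right (by omega : n + 1 ≤ (0 : Int))]
    rw [hc, hmax]
    have hset : setBits x ((-(n + 1)).toNat + 1) = setBits (x + 2 ^ p) (-(n + 1)).toNat := by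
      show setBits (x ||| (x + 1)) (-(n + 1)).toNat = _
      rw [hstep']
    rw [hset]
  | case2 x mask n hn =>
    intro _
    rw [growA, if_neg hn]
    have h0 : (-n).toNat = 0 := by omega
    rw [h0, max_eq_left (by omega : (0 : Int) ≤ n)]
    rfl

theorem popcount_pos_ne_zero (x : Nat) (h : 1 ≤ popcount x) : x ≠ 0 := by
  intro hx
  rw [hx, popcount_zero] at h
  omega

theorem trimA_eq : ∀ (x mask : Nat) (n : Int), n ≤ (popcount x : Int) →
    (∃ j, mask = 2 ^ j ∧ x % mask = 0) → trimA x mask n = clearBits x n.toNat := by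
  intro x mask n
  induction x, mask, n using trimA.induct with
  | case1 x mask n hn m ih =>
    intro hpc hinv
    have hm0 : m = skipZeros x mask := rfl
    rw [hm0] at ih
    have hx : x ≠ 0 := by
      apply popcount_pos_ne_zero
      omega
    obtain ⟨p, hm, hmod⟩ := skipZeros_char x mask hx hinv
    have hp := pow_pos' p
    have hk : (2 : Nat) ^ (p + 1) = 2 * 2 ^ p := by ring
    obtain ⟨q, hq⟩ : ∃ q, x = 2 ^ (p + 1) * q + 2 ^ p := ⟨_, decomp x p (2 ^ p) hmod⟩
    have hstep : x ^^^ skipZeros x mask = x - 2 ^ p := by rw [hm]; exact xor_pow_of_bit x p hmod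
    have hstep' : x &&& (x - 1) = x - 2 ^ p := and_pred_of_bit x p hmod
    have hpcs := popcount_sub_pow x p hmod
    have hinv' : ∃ j, skipZeros x mask = 2 ^ j ∧
        (x ^^^ skipZeros x mask) % skipZeros x mask = 0 := by
      refine ⟨p, hm, ?_⟩
      rw [hstep, hm]
      have hx2 : x - 2 ^ p = 2 ^ p * (2 * q) := by
        rw [hq, hk, Nat.add_sub_cancel]; ring
      rw [hx2, Nat.mul_mod_right]
    have hrec := ih (by
      have e1 : popcount (x ^^^ skipZeros x mask) = popcount (x - 2 ^ p) :=
        congrArg popcount hstep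
      push_cast
      omega) hinv'
    rw [trimA, if_pos hn]
    show trimA (x ^^^ skipZeros x mask) (skipZeros x mask) (n - 1) = _
    rw [hrec, hstep]
    have hc : n.toNat = (n - 1).toNat + 1 := by omega
    rw [hc]
    show _ = clearBits (x &&& (x - 1)) (n - 1).toNat
    rw [hstep']
  | case2 x mask n hn =>
    intro _ _
    rw [trimA, if_neg hn]
    have h0 : n.toNat = 0 := by omega
    rw [h0]
    rfl

theorem setBits_zero (x : Nat) : setBits x 0 = x := rfl
theorem clearBits_zero (x : Nat) : clearBits x 0 = x := rfl

theorem core_eq (a : Nat) (n : Int) (hpc : n ≤ (popcount a : Int)) :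
    trimA (growA a 1 n).1 1 (growA a 1 n).2 = setBits (clearBits a n.toNat) (-n).toNat := by
  rw [growA_eq a 1 n ⟨0, by rw [pow_zero], by omega⟩]
  by_cases hc : 0 ≤ n
  · have h1 : (-n).toNat = 0 := by omega
    dsimp only
    rw [h1, max_eq_left hc, setBits_zero, trimA_eq a 1 n hpc ⟨0, by rw [pow_zero], by omega⟩, setBits_zero]
  · have h3 : n.toNat = 0 := by omega
    dsimp only
    rw [max_eq_right (by omega : n ≤ (0 : Int)), h3, clearBits_zero,
        trimA_eq _ 1 0 (by positivity) ⟨0, by rw [pow_zero], by omega⟩]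
    rfl

-- ===== lemmas for the B side =====

theorem shift_and_one (a p : Nat) : (a >>> p) &&& 1 = a / 2 ^ p % 2 := by
  rw [Nat.shiftRight_eq_div_pow, Nat.and_one_is_mod]

theorem exists_lowbit (m : Nat) (h : m ≠ 0) : ∃ p, m % 2 ^ (p + 1) = 2 ^ p := by
  induction m using Nat.strong_induction_on with
  | _ m ih =>
    rcases Nat.mod_two_eq_zero_or_one m with he | ho
    · have h2 : m / 2 ≠ 0 := by omega
      obtain ⟨p, hp⟩ := ih (m / 2) (Nat.div_lt_self (Nat.pos_of_ne_zero h) one_lt_two) h2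
      refine ⟨p + 1, ?_⟩
      have hmm : m % (2 * 2 ^ (p + 1)) = m % 2 + 2 * (m / 2 % 2 ^ (p + 1)) := Nat.mod_mul
      rw [show (2 : Nat) ^ (p + 1 + 1) = 2 * 2 ^ (p + 1) by ring, hmm, he, hp]
      ring
    · exact ⟨0, by simpa using ho⟩

theorem clearBits_zero_arg : ∀ c, clearBits 0 c = 0
  | 0 => rfl
  | c + 1 => by
      show clearBits (0 &&& (0 - 1)) c = 0
      simpa using clearBits_zero_arg c

theorem clearBits_popcount (m : Nat) : clearBits m (popcount m) = 0 := by
  induction m using Nat.strong_induction_on with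
  | _ m ih =>
    rcases eq_or_ne m 0 with rfl | h
    · rw [popcount_zero]; rfl
    · obtain ⟨p, hp⟩ := exists_lowbit m h
      have h1 := and_pred_of_bit m p hp
      have h2 := popcount_sub_pow m p hp
      have hle : 2 ^ p ≤ m := hp ▸ Nat.mod_le m _
      have hppos := pow_pos' p
      have hc : popcount m = popcount (m - 2 ^ p) + 1 := by omega
      rw [hc]
      show clearBits (m &&& (m - 1)) (popcount (m - 2 ^ p)) = 0
      rw [h1]
      exact ih (m - 2 ^ p) (by omega)

theorem clearBits_high (p : Nat) : ∀ (c m : Nat), m < 2 ^ p → c ≤ popcount m →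
    clearBits (2 ^ p + m) c = 2 ^ p + clearBits m c := by
  intro c
  induction c with
  | zero => intro m _ _; rfl
  | succ c ih =>
    intro m hm hc
    have hm0 : m ≠ 0 := by
      intro h; rw [h, popcount_zero] at hc; omega
    obtain ⟨q, hq⟩ := exists_lowbit m hm0
    have hq2 : 2 ^ q ≤ m := hq ▸ Nat.mod_le m _
    have hqpos := pow_pos' q
    have hqp : q < p := by
      by_contra hcq
      push_neg at hcq
      have := Nat.pow_le_pow_right (by norm_num : 1 ≤ 2) hcq
      omega
    have hmod : (2 ^ p + m) % 2 ^ (q + 1) = 2 ^ q := by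
      obtain ⟨t, ht⟩ : (2 : Nat) ^ (q + 1) ∣ 2 ^ p := pow_dvd_pow 2 (by omega)
      rw [ht, Nat.mul_add_mod, hq]
    have h1 := and_pred_of_bit m q hq
    have h2 := and_pred_of_bit (2 ^ p + m) q hmod
    have h3 := popcount_sub_pow m q hq
    show clearBits ((2 ^ p + m) &&& (2 ^ p + m - 1)) c = 2 ^ p + clearBits (m &&& (m - 1)) c
    rw [h2, h1, show 2 ^ p + m - 2 ^ q = 2 ^ p + (m - 2 ^ q) by omega]
    exact ih (m - 2 ^ q) (by omega) (by omega)

theorem pickHigh_eq (a : Nat) : ∀ (p k res : Nat), res % 2 ^ p = 0 →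
    pickHigh a k res p =
      (res + clearBits (a % 2 ^ p) (popcount (a % 2 ^ p) - k), k - popcount (a % 2 ^ p)) := by
  intro p
  induction p with
  | zero =>
    intro k res _
    simp [pickHigh, Nat.mod_one, clearBits_zero_arg, popcount_zero]
  | succ p ih =>
    intro k res hres
    have hp := pow_pos' p
    have hlow : a % 2 ^ p < 2 ^ p := Nat.mod_lt _ hp
    have hsplit : a % 2 ^ (p + 1) = a % 2 ^ p + 2 ^ p * (a / 2 ^ p % 2) := by
      rw [show (2 : Nat) ^ (p + 1) = 2 ^ p * 2 by ring]; exact Nat.mod_mul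
    obtain ⟨q, hq⟩ : 2 ^ (p + 1) ∣ res := Nat.dvd_of_mod_eq_zero hres
    have hres' : res % 2 ^ p = 0 := by
      rw [hq, show (2 : Nat) ^ (p + 1) * q = 2 ^ p * (2 * q) by ring, Nat.mul_mod_right]
    rcases Nat.mod_two_eq_zero_or_one (a / 2 ^ p) with hb | hb
    · -- bit p of a is 0
      have hcond : ¬(k ≠ 0 ∧ (a >>> p) &&& 1 ≠ 0) := by
        rw [shift_and_one, hb]; simp
      have hsame : a % 2 ^ (p + 1) = a % 2 ^ p := by rw [hsplit, hb]; ring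
      show (if k ≠ 0 ∧ (a >>> p) &&& 1 ≠ 0 then pickHigh a (k - 1) (res ||| (1 <<< p)) p
        else pickHigh a k res p) = _
      rw [if_neg hcond, ih k res hres', hsame]
    · -- bit p of a is 1
      have hsum : a % 2 ^ (p + 1) = 2 ^ p + a % 2 ^ p := by rw [hsplit, hb]; ring
      have hpc1 : popcount (a % 2 ^ (p + 1)) = popcount (a % 2 ^ p) + 1 := by
        rw [hsum, show (2 : Nat) ^ p + a % 2 ^ p = 2 ^ p * 1 + a % 2 ^ p by ring,
            popcount_mul_pow_add p 1 _ hlow, popcount_one]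
        omega
      by_cases hk : k = 0
      · subst hk
        have hcond : ¬((0 : Nat) ≠ 0 ∧ (a >>> p) &&& 1 ≠ 0) := by simp
        show (if (0 : Nat) ≠ 0 ∧ (a >>> p) &&& 1 ≠ 0 then pickHigh a (0 - 1) (res ||| (1 <<< p)) p
          else pickHigh a 0 res p) = _
        rw [if_neg hcond, ih 0 res hres']
        have e1 : clearBits (a % 2 ^ p) (popcount (a % 2 ^ p) - 0) = 0 := by
          rw [Nat.sub_zero]; exact clearBits_popcount _
        have e2 : clearBits (a % 2 ^ (p + 1)) (popcount (a % 2 ^ (p + 1)) - 0) = 0 := by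
          rw [Nat.sub_zero]; exact clearBits_popcount _
        rw [e1, e2]
        simp [Nat.zero_sub]
      · have hcond : k ≠ 0 ∧ (a >>> p) &&& 1 ≠ 0 := by
          refine ⟨hk, ?_⟩
          rw [shift_and_one, hb]; omega
        have hor : res ||| 1 <<< p = res + 2 ^ p := by
          rw [Nat.shiftLeft_eq, one_mul, hq]
          have h := or_chunk (p + 1) q 0 0 (2 ^ p) (pow_pos' (p + 1))
            (by rw [show (2 : Nat) ^ (p + 1) = 2 * 2 ^ p by ring]; omega)
          simpa using h
        have hres2 : (res + 2 ^ p) % 2 ^ p = 0 := by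
          rw [hq, show (2 : Nat) ^ (p + 1) * q + 2 ^ p = 2 ^ p * (2 * q + 1) by ring,
              Nat.mul_mod_right]
        have hc1 : popcount (a % 2 ^ p) - (k - 1) = popcount (a % 2 ^ (p + 1)) - k := by omega
        have hc2 : (k - 1) - popcount (a % 2 ^ p) = k - popcount (a % 2 ^ (p + 1)) := by omega
        have hpc1' : popcount (2 ^ p + a % 2 ^ p) = popcount (a % 2 ^ p) + 1 := by
          rw [← hsum]; exact hpc1
        have hch : clearBits (a % 2 ^ (p + 1)) (popcount (a % 2 ^ (p + 1)) - k) =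
            2 ^ p + clearBits (a % 2 ^ p) (popcount (a % 2 ^ (p + 1)) - k) := by
          rw [hsum]
          exact clearBits_high p _ _ hlow (by omega)
        show (if k ≠ 0 ∧ (a >>> p) &&& 1 ≠ 0 then pickHigh a (k - 1) (res ||| (1 <<< p)) p
          else pickHigh a k res p) = _
        rw [if_pos hcond, hor, ih (k - 1) (res + 2 ^ p) hres2, hc1, hc2, hch]
        simp only [Prod.mk.injEq]
        exact ⟨by omega, trivial⟩

theorem fillLow_eq : ∀ (res k pos : Nat), res % 2 ^ pos = 2 ^ pos - 1 →
    fillLow res k pos = setBits res k := by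
  intro res k pos
  induction res, k, pos using fillLow.induct with
  | case1 res k pos hk hb ih =>
    intro hres
    have hp := pow_pos' pos
    have hb' : res / 2 ^ pos % 2 = 0 := by rw [← shift_and_one]; exact hb
    have hmod : res % 2 ^ (pos + 1) = 2 ^ pos - 1 := by
      have hmm : res % (2 ^ pos * 2) = res % 2 ^ pos + 2 ^ pos * (res / 2 ^ pos % 2) :=
        Nat.mod_mul
      rw [show (2 : Nat) ^ (pos + 1) = 2 ^ pos * 2 by ring, hmm, hb', hres]
      ring
    have hor1 : res ||| 1 <<< pos = res + 2 ^ pos := by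
      rw [Nat.shiftLeft_eq, one_mul]; exact or_pow_of_ones res pos hmod
    have hor2 : res ||| (res + 1) = res + 2 ^ pos := or_succ_of_ones res pos hmod
    have hres' : (res + 2 ^ pos) % 2 ^ (pos + 1) = 2 ^ (pos + 1) - 1 := by
      obtain ⟨q, hq⟩ : ∃ q, res = 2 ^ (pos + 1) * q + (2 ^ pos - 1) :=
        ⟨_, decomp res pos _ hmod⟩
      have hk2 : (2 : Nat) ^ (pos + 1) = 2 * 2 ^ pos := by ring
      rw [show res + 2 ^ pos = 2 ^ (pos + 1) * q + (2 ^ (pos + 1) - 1) by omega,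
          Nat.mul_add_mod]
      exact Nat.mod_eq_of_lt (by omega)
    rw [fillLow, if_pos hk, if_pos hb, ih (by rw [hor1]; exact hres'), hor1]
    have hkc : k = (k - 1) + 1 := by omega
    rw [hkc]
    show setBits (res + 2 ^ pos) (k - 1) = setBits (res ||| (res + 1)) (k - 1)
    rw [hor2]
  | case2 res k pos hk hb ih =>
    intro hres
    have hp := pow_pos' pos
    have hb' : res / 2 ^ pos % 2 = 1 := by
      have h := shift_and_one res pos
      rcases Nat.mod_two_eq_zero_or_one (res / 2 ^ pos) with h2 | h2
      · exact absurd (by rw [h, h2]) hb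
      · exact h2
    have hmod : res % 2 ^ (pos + 1) = 2 ^ (pos + 1) - 1 := by
      have hmm : res % (2 ^ pos * 2) = res % 2 ^ pos + 2 ^ pos * (res / 2 ^ pos % 2) :=
        Nat.mod_mul
      rw [show (2 : Nat) ^ (pos + 1) = 2 ^ pos * 2 by ring, hmm, hb', hres]
      omega
    rw [fillLow, if_pos hk, if_neg hb]
    exact ih hmod
  | case3 res k pos hk =>
    intro _
    have h0 : k = 0 := by simpa using hk
    rw [fillLow, if_neg hk, h0]
    rfl

theorem alt_eq (num1 num2 : Int) :
    minimizeXor_alt num1 num2 =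
      ((setBits
          (clearBits num1.natAbs
            ((popcount num1.natAbs : Int) - (popcount num2.natAbs : Int)).toNat)
          (-((popcount num1.natAbs : Int) - (popcount num2.natAbs : Int))).toNat : Nat) : Int) := by
  have hmodA : num1.natAbs % 2 ^ bitLength num1.natAbs = num1.natAbs :=
    Nat.mod_eq_of_lt (lt_two_pow_bitLength _)
  have h1 := pickHigh_eq num1.natAbs (bitLength num1.natAbs) (popcount num2.natAbs) 0
    (Nat.zero_mod _)
  rw [hmodA] at h1
  have h2 := fillLow_eq
    (clearBits num1.natAbs (popcount num1.natAbs - popcount num2.natAbs))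
    (popcount num2.natAbs - popcount num1.natAbs) 0 (by rw [pow_zero, Nat.mod_one]; rfl)
  have e1 : ((popcount num1.natAbs : Int) - (popcount num2.natAbs : Int)).toNat =
      popcount num1.natAbs - popcount num2.natAbs := by omega
  have e2 : (-((popcount num1.natAbs : Int) - (popcount num2.natAbs : Int))).toNat =
      popcount num2.natAbs - popcount num1.natAbs := by omega
  show ((fillLow (pickHigh num1.natAbs (popcount num2.natAbs) 0 (bitLength num1.natAbs)).1
      (pickHigh num1.natAbs (popcount num2.natAbs) 0 (bitLength num1.natAbs)).2 0 : Nat) : Int) = _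
  rw [h1]
  simp only [Nat.zero_add]
  rw [h2, e1, e2]

theorem minimizeXor_eq_alt (num1 num2 : Int) (h1 : 0 ≤ num1) :
    minimizeXor num1 num2 = minimizeXor_alt num1 num2 := by
  have h0 : (0 : Int) ≤ (popcount num2.natAbs : Int) := by positivity
  have hT : num1.toNat = num1.natAbs := by omega
  have h := core_eq num1.natAbs
      ((popcount num1.natAbs : Int) - (popcount num2.natAbs : Int)) (by omega)
  rw [alt_eq]
  simp only [minimizeXor, hT]
  exact congrArg _ h

-- ===== VERDICT (by name: the statement is the Claim_ definition above) =====
theorem minimizeXor_spec : Claim_equal_minimizeXor := by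
  intro num1 num2 _ hpre
  unfold Spec_minimizeXor
  exact minimizeXor_eq_alt num1 num2 hpre
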